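-- pv_equiv track=rewrite | github.com/DiegoPerdomo0805/proyecto_logica_1 | DPLL.py | getLiterals
-- ===== SOURCE A (Python) =====
-- def getLiterals(B):
--   '''
--   Devuelve una lista con las literales
--   de las clausulas dentro de B
--   '''
--   literals = []
--
--   for clause in B:
--     for L in clause:
--       temp_L = L[1:] if L[0] == '!' else L
--
--       if temp_L not in literals:
--         literals.append(temp_L)
--
--   return literals
-- ===== SOURCE B (Python) =====
-- def getLiterals(B):
--   # Flatten all literals with negation stripped (duplicates kept).
--   flat = [L[1:] if L[0] == '!' else L for clause in B for L in clause]
--   # Selection-style dedup: repeatedly take the first remaining literal and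
--   # delete every later copy of it from the work list.  No membership test
--   # against the output is ever made.
--   out = []
--   while flat:
--     h = flat[0]
--     out.append(h)
--     flat = [x for x in flat if x != h]
--   return out
-- ===== Notes on version B (the rewrite author's own statement) =====
-- stated objective: alternative
-- what changed: Replaces A's single interleaved scan with an 'already collected?' membership branch by two stages: flatten all stripped literals first, then a selection-style dedup that repeatedly takes the first remaining literal and filters all its later copies out of the work list, so the output is never searched.
import Mathlib
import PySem

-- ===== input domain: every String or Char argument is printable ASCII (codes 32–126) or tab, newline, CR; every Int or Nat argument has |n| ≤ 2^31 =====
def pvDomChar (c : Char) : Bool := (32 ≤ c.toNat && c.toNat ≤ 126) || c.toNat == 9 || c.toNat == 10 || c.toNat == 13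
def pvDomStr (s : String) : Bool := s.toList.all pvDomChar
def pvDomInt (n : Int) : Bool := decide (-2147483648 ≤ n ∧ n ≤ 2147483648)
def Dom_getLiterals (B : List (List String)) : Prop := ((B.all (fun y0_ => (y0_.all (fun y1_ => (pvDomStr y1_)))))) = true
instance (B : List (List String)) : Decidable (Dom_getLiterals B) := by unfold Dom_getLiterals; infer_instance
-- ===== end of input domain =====

-- B flattens all stripped literals first, then deduplicates by selection (take first remaining, filter out its later copies) instead of A's interleaved membership-branch scan; same return value, no speed claim.
-- ===== PORT A =====
-- shared helper: the exact stripping expression `L[1:] if L[0] == '!' else L` of both Pythons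
def pvStrip (L : String) : String :=
  if PySem.Str.pyGet? L 0 = some '!' then PySem.Str.slice L (some 1) none else L

def getLiterals (B : List (List String)) : List String :=
  B.foldl (fun literals clause =>
    clause.foldl (fun literals L =>
      let temp_L := pvStrip L
      if literals.contains temp_L then literals else literals ++ [temp_L]) literals) []

-- ===== PORT B =====
-- the while loop of Source B: take the head, then filter every copy of it out of the
-- work list (filtering the whole list `h :: t` removes the head h itself, so only
-- t is filtered) and continue on the remainder
def pvSelect (xs : List String) : List String :=
  match xs with
  | [] => []
  | h :: t => h :: pvSelect (t.filter (fun x => x ≠ h))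
termination_by xs.length
decreasing_by
  simp only [List.length_unattach]
  exact Nat.lt_succ_of_le ((List.length_filter_le _ _).trans (le_of_eq (List.length_attach (l := t))))

def getLiterals_alt (B : List (List String)) : List String :=
  pvSelect (B.flatMap (fun clause => clause.map pvStrip))

-- ===== PRECONDITION & SPEC =====
-- Pre_ excludes inputs containing an empty-string literal: there both A and B raise IndexError on L[0].
def Pre_getLiterals (B : List (List String)) : Prop := ∀ c ∈ B, ∀ L ∈ c, L ≠ ""
instance (B : List (List String)) : Decidable (Pre_getLiterals B) := by unfold Pre_getLiterals; infer_instance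
def pvWitness_getLiterals : List (List String) := [["!p", "q"], ["p", "!q", "r"]]
def Spec_getLiterals (B : List (List String)) (out : List String) : Prop := out = getLiterals_alt B
instance (B : List (List String)) (out : List String) : Decidable (Spec_getLiterals B out) := by unfold Spec_getLiterals; infer_instance

-- ===== CLAIM (what is proved, stated in full; the proofs are below) =====
def Claim_equal_getLiterals : Prop := ∀ (B : List (List String)), Dom_getLiterals B → Pre_getLiterals B → Spec_getLiterals B (getLiterals B)

-- ===== LEMMAS AND PROOFS =====
-- A's inner loop over a clause is the dedup-accumulating fold over the stripped clause.
theorem pv_inner (clause : List String) (acc : List String) :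
    clause.foldl (fun literals L =>
      let temp_L := pvStrip L
      if literals.contains temp_L then literals else literals ++ [temp_L]) acc
    = (clause.map pvStrip).foldl PySem.Set.add acc := by
  induction clause generalizing acc with
  | nil => rfl
  | cons L rest ih => exact ih (PySem.Set.add acc (pvStrip L))

-- A's nested fold is the single dedup-accumulating fold over the flattened stripped list.
theorem pv_outer (B : List (List String)) (acc : List String) :
    B.foldl (fun literals clause =>
      clause.foldl (fun literals L =>
        let temp_L := pvStrip L
        if literals.contains temp_L then literals else literals ++ [temp_L]) literals) acc
    = (B.flatMap (fun clause => clause.map pvStrip)).foldl PySem.Set.add acc := by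
  induction B generalizing acc with
  | nil => rfl
  | cons c rest ih =>
    rw [List.flatMap_cons, List.foldl_append, ← pv_inner]
    exact ih _

@[simp] theorem pvSelect_nil : pvSelect [] = [] := by rw [pvSelect]
theorem pvSelect_cons (h : String) (t : List String) :
    pvSelect (h :: t) = h :: pvSelect (t.filter (fun x => x ≠ h)) := by rw [pvSelect]

-- Invariant linking A's accumulator fold to B's selection recursion.
theorem pv_select_inv (xs : List String) (acc : List String) :
    xs.foldl PySem.Set.add acc
      = acc ++ pvSelect (xs.filter (fun x => !acc.contains x)) := by
  induction xs generalizing acc with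
  | nil => simp
  | cons x t ih =>
    by_cases hx : x ∈ acc
    · have hadd : PySem.Set.add acc x = acc := by
        simp [PySem.Set.add, hx]
      have hc : (!acc.contains x) = false := by simpa using hx
      simp only [List.foldl_cons, hadd, List.filter_cons, hc]
      exact ih acc
    · have hadd : PySem.Set.add acc x = acc ++ [x] := by
        simp [PySem.Set.add, hx]
      have hc : (!acc.contains x) = true := by simpa using hx
      simp only [List.foldl_cons, hadd, List.filter_cons, hc, if_true]
      rw [ih (acc ++ [x]), pvSelect_cons, List.filter_filter,
        List.append_assoc, List.singleton_append]
      congr 3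
      apply List.filter_congr
      intro y _
      by_cases hy : y = x
      · simp [hy]
      · simp [hy]

-- ===== VERDICT (by name: the statement is the Claim_ definition above) =====
theorem getLiterals_spec : Claim_equal_getLiterals := by
  intro B _ _
  unfold Spec_getLiterals getLiterals getLiterals_alt
  rw [pv_outer, pv_select_inv]
  simp
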